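-- pv_equiv track=rewrite | github.com/MelanieMEB/advent-of-code-2020-py | advent_06.py | split_group_array
-- ===== SOURCE A (Python) =====
-- def split_group_array(batch_file):
--     answers_for_group = []
--     groups = []
--     for line in batch_file:
--         if(line == ""):
--             groups.append(answers_for_group)
--             answers_for_group = []
--         else:
--             answers_for_group.append(line)
--     groups.append(answers_for_group)
--     return groups
-- ===== SOURCE B (Python) =====
-- def split_group_array(batch_file):
--     if "" in batch_file:
--         i = batch_file.index("")
--         return [batch_file[:i]] + split_group_array(batch_file[i + 1:])
--     return [batch_file]
-- ===== Notes on version B (the rewrite author's own statement) =====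
-- stated objective: simpler
-- what changed: Replaces the accumulator loop (current-group list plus groups list mutated line by line) with a recursive decomposition: slice off the prefix before the first empty line and recurse on the rest.
import Mathlib
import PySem

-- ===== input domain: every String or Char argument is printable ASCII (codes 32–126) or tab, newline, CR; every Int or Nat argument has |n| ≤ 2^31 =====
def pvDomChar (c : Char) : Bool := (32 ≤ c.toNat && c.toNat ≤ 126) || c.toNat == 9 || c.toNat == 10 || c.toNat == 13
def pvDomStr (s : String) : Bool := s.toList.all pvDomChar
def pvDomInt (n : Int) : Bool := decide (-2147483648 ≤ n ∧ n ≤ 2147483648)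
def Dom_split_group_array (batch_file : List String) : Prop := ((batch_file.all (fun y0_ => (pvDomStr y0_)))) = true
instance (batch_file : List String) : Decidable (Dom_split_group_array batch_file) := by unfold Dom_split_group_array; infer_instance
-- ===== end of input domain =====

-- B replaces A's accumulator loop by a recursive split at the first empty line (same values; different decomposition).

-- ===== PORT A =====
-- A's loop state: (answers_for_group, groups); finally groups ++ [answers_for_group].
def split_group_array (batch_file : List String) : List (List String) :=
  let st := batch_file.foldl
    (fun (s : List String × List (List String)) line =>
      if line = "" then ([], s.2 ++ [s.1]) else (s.1 ++ [line], s.2))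
    ([], [])
  st.2 ++ [st.1]

-- ===== PORT B =====
def split_group_array_alt (batch_file : List String) : List (List String) :=
  if h : "" ∈ batch_file then
    let i := (PySem.List.index? batch_file "").get
      (by rw [PySem.List.index?_isSome_iff]; exact h)
    PySem.List.slice batch_file none (some (i : Int)) ::
      split_group_array_alt (PySem.List.slice batch_file (some ((i : Int) + 1)) none)
  else [batch_file]
termination_by batch_file.length
decreasing_by
  have hi : PySem.List.index? batch_file "" = some i := (Option.some_get _).symm
  obtain ⟨hk, _, _⟩ := PySem.List.getElem_of_index?_eq_some hi
  have : ((i : Int) + 1) = ((i + 1 : Nat) : Int) := by push_cast; ring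
  rw [this, PySem.List.slice_from_natCast]
  simp [List.length_drop]
  omega

-- ===== PRECONDITION & SPEC =====
def Spec_split_group_array (batch_file : List String) (out : List (List String)) : Prop := out = split_group_array_alt batch_file
instance (batch_file : List String) (out : List (List String)) : Decidable (Spec_split_group_array batch_file out) := by unfold Spec_split_group_array; infer_instance

-- ===== CLAIM (what is proved, stated in full; the proofs are below) =====
def Claim_equal_split_group_array : Prop := ∀ (batch_file : List String), Dom_split_group_array batch_file → Spec_split_group_array batch_file (split_group_array batch_file)

-- ===== LEMMAS AND PROOFS =====

/-- apply f to the first group (used only by the proofs). -/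
def pvMapHead (f : List String → List String) : List (List String) → List (List String)
  | [] => []
  | g :: gs => f g :: gs

theorem alt_nil : split_group_array_alt [] = [[]] := by
  rw [split_group_array_alt]; simp

theorem alt_cons_sep (xs : List String) :
    split_group_array_alt ("" :: xs) = [] :: split_group_array_alt xs := by
  rw [split_group_array_alt]
  have hmem : "" ∈ ("" :: xs) := List.mem_cons_self
  rw [dif_pos hmem]
  have hi : PySem.List.index? ("" :: xs) "" = some 0 := PySem.List.index?_cons_self _ _
  simp only [hi, Option.get_some]
  rw [show ((0 : Nat) : Int) = ((0 : Nat) : Int) from rfl, PySem.List.slice_to_natCast,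
      show ((0 : Nat) : Int) + 1 = ((1 : Nat) : Int) by norm_num, PySem.List.slice_from_natCast]
  simp

theorem alt_cons_ne (x : String) (xs : List String) (hx : x ≠ "") :
    split_group_array_alt (x :: xs) = pvMapHead (x :: ·) (split_group_array_alt xs) := by
  rw [split_group_array_alt]
  by_cases hmem : "" ∈ xs
  · have hmem' : "" ∈ (x :: xs) := List.mem_cons_of_mem _ hmem
    rw [dif_pos hmem']
    obtain ⟨j, hj⟩ : ∃ j, PySem.List.index? xs "" = some j := by
      have := (PySem.List.index?_isSome_iff (xs := xs) (v := "")).2 hmem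
      exact Option.isSome_iff_exists.mp this
    have hi : PySem.List.index? (x :: xs) "" = some (j + 1) := by
      rw [PySem.List.index?_cons_of_ne xs hx, hj]; rfl
    simp only [hi, Option.get_some]
    conv_rhs => rw [split_group_array_alt]
    rw [dif_pos hmem]
    simp only [hj, Option.get_some, pvMapHead]
    have h1 : PySem.List.slice (x :: xs) none (some ((j + 1 : Nat) : Int)) =
        x :: PySem.List.slice xs none (some ((j : Nat) : Int)) := by
      rw [PySem.List.slice_to_natCast, PySem.List.slice_to_natCast]
      simp [List.take_succ_cons]
    have h2 : PySem.List.slice (x :: xs) (some (((j + 1 : Nat) : Int) + 1)) none =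
        PySem.List.slice xs (some (((j : Nat) : Int) + 1)) none := by
      rw [show (((j + 1 : Nat) : Int) + 1) = ((j + 2 : Nat) : Int) by push_cast; ring,
          show (((j : Nat) : Int) + 1) = ((j + 1 : Nat) : Int) by push_cast; ring,
          PySem.List.slice_from_natCast, PySem.List.slice_from_natCast]
      simp [List.drop_succ_cons]
    rw [h1, h2]
  · have hmem' : "" ∉ (x :: xs) := by
      intro h; rcases List.mem_cons.mp h with h | h
      · exact hx h.symm
      · exact hmem h
    rw [dif_neg hmem']
    conv_rhs => rw [split_group_array_alt]
    rw [dif_neg hmem]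
    simp [pvMapHead]

theorem pvMapHead_comp (f g : List String → List String) (l : List (List String)) :
    pvMapHead f (pvMapHead g l) = pvMapHead (fun t => f (g t)) l := by
  cases l <;> simp [pvMapHead]

/-- A's loop, started from an arbitrary state, in terms of B. -/
theorem loop_eq (xs : List String) : ∀ (acc : List String) (groups : List (List String)),
    (xs.foldl
        (fun (s : List String × List (List String)) line =>
          if line = "" then ([], s.2 ++ [s.1]) else (s.1 ++ [line], s.2))
        (acc, groups)).2 ++
      [(xs.foldl
        (fun (s : List String × List (List String)) line =>
          if line = "" then ([], s.2 ++ [s.1]) else (s.1 ++ [line], s.2))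
        (acc, groups)).1] = groups ++ pvMapHead (acc ++ ·) (split_group_array_alt xs) := by
  induction xs with
  | nil => intro acc groups; simp [alt_nil, pvMapHead]
  | cons x xs ih =>
    intro acc groups
    by_cases hx : x = ""
    · subst hx
      simp only [List.foldl_cons, if_true]
      rw [ih [] (groups ++ [acc]), alt_cons_sep]
      cases h : split_group_array_alt xs with
      | nil => simp [pvMapHead]
      | cons g gs => simp [pvMapHead]
    · simp only [List.foldl_cons, if_neg hx]
      rw [ih (acc ++ [x]) groups, alt_cons_ne x xs hx, pvMapHead_comp]
      have : (fun t => acc ++ (x :: t)) = (fun t => (acc ++ [x]) ++ t) := by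
        funext t; simp
      rw [this]

-- ===== VERDICT (by name: the statement is the Claim_ definition above) =====
theorem split_group_array_spec : Claim_equal_split_group_array := by
  intro batch_file _
  unfold Spec_split_group_array split_group_array
  simp only []
  rw [loop_eq batch_file [] []]
  cases h : split_group_array_alt batch_file <;> simp [pvMapHead]
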